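-- pv_equiv track=rewrite | github.com/mvrba1/krypto | RSA/rsa_Vrba.py | prevodCisla
-- ===== SOURCE A (Python) =====
-- def prevodCisla(cislo):
--     text = ""
--     for i in cislo:
--         binarka = bin(i)[2:]
--         while len(binarka) % 12 != 0:
--             binarka = "0" + binarka
--         blocks = [binarka[i:i + 12] for i in range(0, len(binarka), 12)]
--         decimal = []
--         for i in blocks:
--             decimal.append(int(i, 2))
--         for i in decimal:
--             text = text + chr(i)
--     return text
-- ===== SOURCE B (Python) =====
-- def prevodCisla(cislo):
--     chars = []
--     for i in cislo:
--         nblocks = max(1, (i.bit_length() + 11) // 12)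
--         for k in reversed(range(nblocks)):
--             chars.append(chr((i >> (12 * k)) & 0xFFF))
--     return "".join(chars)
-- ===== Notes on version B (the rewrite author's own statement) =====
-- stated objective: simpler
-- what changed: B extracts each 12-bit block arithmetically (bit_length to count blocks, shift-and-mask per block) instead of building a binary string, padding it with a while-loop, slicing it into 12-char pieces and re-parsing each piece with int(…,2); Pre_ restricts to nonnegative elements (the natural domain: on negatives A raises ValueError except an accidental '0b'-prefix corner).
-- outside the precondition, e.g. on prevodCisla([-612]): A returns 'ɤ', B returns 'ග'; on prevodCisla([-5]): A raises ValueError, B returns '\u0ffb'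
import Mathlib
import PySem

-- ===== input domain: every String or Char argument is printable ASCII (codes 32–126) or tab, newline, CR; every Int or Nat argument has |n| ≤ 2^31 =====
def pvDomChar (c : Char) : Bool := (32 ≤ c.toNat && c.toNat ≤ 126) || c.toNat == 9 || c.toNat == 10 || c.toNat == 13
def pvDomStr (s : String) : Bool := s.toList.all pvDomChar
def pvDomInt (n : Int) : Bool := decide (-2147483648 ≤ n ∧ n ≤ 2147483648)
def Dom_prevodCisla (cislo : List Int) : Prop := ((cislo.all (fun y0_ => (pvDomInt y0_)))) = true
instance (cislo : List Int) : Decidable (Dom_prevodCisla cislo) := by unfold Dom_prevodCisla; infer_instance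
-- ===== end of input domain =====

-- B replaces A's binary-string build / pad / slice / reparse with direct arithmetic extraction of
-- the 12-bit blocks (bit_length, shift and mask); objective: simpler (no intermediate strings).

-- ===== PORT A =====

-- bin(i)[2:] for i ≥ 0 (hand port of CPython's bin: MSB-first binary digits, "0" for 0;
-- exact for i ≥ 0 — for i < 0 Python's int(…, 2) later raises ValueError, excluded by Pre_)
def pvBinDigits : Nat → List Char
  | 0 => []
  | n+1 => pvBinDigits ((n+1)/2) ++ [if (n+1) % 2 = 1 then '1' else '0']
decreasing_by exact Nat.div_lt_self (Nat.succ_pos n) Nat.one_lt_two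

def pvBin (n : Nat) : List Char := if n = 0 then ['0'] else pvBinDigits n

-- the while-loop: prepend '0' until the length is a multiple of 12 (fuel 12 suffices:
-- at most 11 characters are ever prepended, so the fuel guard never fires)
def pvPadLoop : Nat → List Char → List Char
  | 0, s => s
  | f+1, s => if s.length % 12 = 0 then s else pvPadLoop f ('0' :: s)

-- range(a, L, 12) (hand port, exact for step 12 and Nat bounds)
def pvRange12 (a L : Nat) : List Nat :=
  if h : a < L then a :: pvRange12 (a+12) L else []
termination_by L - a
decreasing_by exact Nat.sub_lt_sub_left h (Nat.lt_add_of_pos_right (Nat.zero_lt_succ 11))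

-- int(s, 2) on a string of '0'/'1' digits (exact there; A only parses such strings on Pre_)
def pvParseBin2 (s : List Char) : Nat :=
  s.foldl (fun acc c => 2 * acc + (if c = '1' then 1 else 0)) 0

def prevodCisla (cislo : List Int) : String :=
  String.mk (cislo.foldl (fun text i =>
    let binarka := pvPadLoop 12 (pvBin i.toNat)
    -- binarka[j:j+12]: slice with nonneg bounds = drop/take
    let blocks := (pvRange12 0 binarka.length).map (fun j => (binarka.drop j).take 12)
    let decimal := blocks.foldl (fun d b => d ++ [pvParseBin2 b]) ([] : List Nat)
    decimal.foldl (fun t v => t ++ [Char.ofNat v]) text) [])  -- chr(v): v < 4096, always a scalar value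

-- ===== PORT B =====

def prevodCisla_alt (cislo : List Int) : String :=
  String.mk (cislo.foldl (fun chars i =>
    let nblocks := max 1 ((PySem.Int.bitLength i + 11) / 12)
    (List.range nblocks).reverse.foldl (fun cs (k : Nat) =>
      -- chr((i >> (12*k)) & 0xFFF): Python >> is Lean's >>>, & via PySem.Int.band (exact on negatives too)
      cs ++ [Char.ofNat (PySem.Int.band (i >>> (12 * k)) 4095).toNat]) chars) [])

-- ===== PRECONDITION & SPEC =====
-- Pre_ restricts to the function's natural domain, lists of nonnegative code numbers: on a negative
-- element A almost always raises ValueError (bin(i)[2:] keeps a stray 'b'), except an accidental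
-- corner (|i|.bit_length() ≡ 10 mod 12) where zero-padding turns that 'b' into a '0b' base prefix
-- and A returns the chr of |i|'s bits; mirroring that accident in B would need contrived branches.
def Pre_prevodCisla (cislo : List Int) : Prop := ∀ x ∈ cislo, 0 ≤ x
instance (cislo : List Int) : Decidable (Pre_prevodCisla cislo) := by unfold Pre_prevodCisla; infer_instance
def pvWitness_prevodCisla : List Int := [0, 5, 4096, 294921]

def Spec_prevodCisla (cislo : List Int) (out : String) : Prop := out = prevodCisla_alt cislo
instance (cislo : List Int) (out : String) : Decidable (Spec_prevodCisla cislo out) := by unfold Spec_prevodCisla; infer_instance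

-- ===== CLAIM (what is proved, stated in full; the proofs are below) =====
def Claim_equal_prevodCisla : Prop := ∀ (cislo : List Int), Dom_prevodCisla cislo → Pre_prevodCisla cislo → Spec_prevodCisla cislo (prevodCisla cislo)

-- ===== LEMMAS AND PROOFS =====

-- w-bit fixed-width binary of m (MSB first): the canonical form both programs reduce to
def pvFixed (m : Nat) : Nat → List Char
  | 0 => []
  | w+1 => pvFixed (m/2) w ++ [if m % 2 = 1 then '1' else '0']

theorem pvFixed_length (m w : Nat) : (pvFixed m w).length = w := by
  induction w generalizing m with
  | zero => rfl
  | succ w ih => simp [pvFixed, ih]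

theorem pvFixed_split (b a m : Nat) :
    pvFixed m (a + b) = pvFixed (m / 2^b) a ++ pvFixed (m % 2^b) b := by
  induction b generalizing m with
  | zero => simp [pvFixed]
  | succ b ih =>
    have h1 : m / 2 / 2^b = m / 2^(b+1) := by
      rw [Nat.div_div_eq_div_mul, pow_succ']
    have h2 : m / 2 % 2^b = m % 2^(b+1) / 2 := by
      rw [pow_succ', Nat.mod_mul_right_div_self]
    have h3 : m % 2 = m % 2^(b+1) % 2 := by
      rw [Nat.mod_mod_of_dvd _ (dvd_pow_self 2 (Nat.succ_ne_zero b))]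
    show pvFixed m (a + b + 1) = _
    rw [show a + b + 1 = (a + b) + 1 from rfl]
    simp only [pvFixed, ih, h1, h2, h3, List.append_assoc]

theorem pvParse_snoc (s : List Char) (c : Char) (acc : Nat) :
    (s ++ [c]).foldl (fun acc c => 2 * acc + (if c = '1' then 1 else 0)) acc
      = 2 * (s.foldl (fun acc c => 2 * acc + (if c = '1' then 1 else 0)) acc)
        + (if c = '1' then 1 else 0) := by
  simp [List.foldl_append]

theorem pvMod_pow_succ (m w : Nat) : 2*(m/2 % 2^w) + m % 2 = m % 2^(w+1) := by
  have h1 : m % 2 < 2 := Nat.mod_lt _ (by omega)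
  have h2 : m / 2 % 2^w < 2^w := Nat.mod_lt _ (Nat.two_pow_pos w)
  have hq : 2 * (m / 2) + m % 2 = m := Nat.div_add_mod m 2
  have he : 2^w * (m / 2 / 2^w) + (m / 2) % 2^w = m / 2 := Nat.div_add_mod (m/2) (2^w)
  have h4 : (m / 2 / 2^w) * (2 * 2^w) = 2 * (2^w * (m / 2 / 2^w)) := by ring
  have h3 : m = (2*(m/2 % 2^w) + m % 2) + (m/2/2^w) * (2*2^w) := by omega
  calc 2*(m/2 % 2^w) + m % 2
      = (2*(m/2 % 2^w) + m % 2) % (2*2^w) := (Nat.mod_eq_of_lt (by omega)).symm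
    _ = ((2*(m/2 % 2^w) + m % 2) + (m/2/2^w)*(2*2^w)) % (2*2^w) := (Nat.add_mul_mod_self_right _ _ _).symm
    _ = m % (2*2^w) := by rw [← h3]
    _ = m % 2^(w+1) := by rw [pow_succ']

theorem pvParse_pvFixed (m w : Nat) : pvParseBin2 (pvFixed m w) = m % 2^w := by
  induction w generalizing m with
  | zero => simp [pvFixed, pvParseBin2, Nat.mod_one]
  | succ w ih =>
    show pvParseBin2 (pvFixed (m/2) w ++ [_]) = _
    unfold pvParseBin2 at *
    rw [pvParse_snoc, ih]
    have h2 : m % 2 < 2 := Nat.mod_lt _ (by omega)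
    have hcase : m % 2 = 0 ∨ m % 2 = 1 := by omega
    have hbit : (if (if m % 2 = 1 then '1' else '0') = '1' then 1 else 0) = m % 2 := by
      rcases hcase with h | h <;> simp [h]
    rw [hbit]
    exact pvMod_pow_succ m w

theorem pvBinDigits_pos (n : Nat) (h : 0 < n) :
    pvBinDigits n = pvBinDigits (n/2) ++ [if n % 2 = 1 then '1' else '0'] := by
  cases n with
  | zero => omega
  | succ n => rw [pvBinDigits]

theorem pvBinDigits_length (n : Nat) : (pvBinDigits n).length = PySem.Int.bitLength (n : Int) := by
  induction n using Nat.strong_induction_on with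
  | _ n ih =>
    cases n with
    | zero => simp [pvBinDigits, PySem.Int.bitLength_zero]
    | succ n =>
      rw [pvBinDigits_pos _ (Nat.succ_pos n), PySem.Int.bitLength_natCast (Nat.succ_pos n)]
      simp [ih ((n+1)/2) (by omega)]

theorem pvFixed_zero (w : Nat) : pvFixed 0 w = List.replicate w '0' := by
  induction w with
  | zero => rfl
  | succ w ih => simp [pvFixed, ih, List.replicate_succ' (n := w)]

theorem pvFixed_eq_pad (m w : Nat) (h : (pvBinDigits m).length ≤ w) :
    pvFixed m w = List.replicate (w - (pvBinDigits m).length) '0' ++ pvBinDigits m := by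
  induction w generalizing m with
  | zero =>
    have h0 : (pvBinDigits m).length = 0 := by omega
    simp_all [pvFixed, List.length_eq_zero_iff.mp h0]
  | succ w ih =>
    cases Nat.eq_zero_or_pos m with
    | inl h0 => subst h0; simp [pvFixed_zero, pvBinDigits]
    | inr hpos =>
      have hd := pvBinDigits_pos m hpos
      have hlen : (pvBinDigits (m/2)).length + 1 = (pvBinDigits m).length := by
        rw [hd]; simp
      show pvFixed (m/2) w ++ [_] = _
      rw [ih (m/2) (by omega), hd]
      simp [List.append_assoc]

theorem pvPadLoop_eq (f : Nat) (s : List Char) (hf : (12 - s.length % 12) % 12 ≤ f) :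
    pvPadLoop f s = List.replicate ((12 - s.length % 12) % 12) '0' ++ s := by
  induction f generalizing s with
  | zero =>
    have h0 : (12 - s.length % 12) % 12 = 0 := by omega
    simp [pvPadLoop, h0]
  | succ f ih =>
    by_cases h : s.length % 12 = 0
    · have h0 : (12 - s.length % 12) % 12 = 0 := by omega
      simp [pvPadLoop, h]
    · have hrec : pvPadLoop (f+1) s = pvPadLoop f ('0'::s) := by simp [pvPadLoop, h]
      have hlen : ('0'::s).length = s.length + 1 := by simp
      rw [hrec, ih ('0'::s) (by rw [hlen]; omega)]
      rw [hlen]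
      have hc : (12 - (s.length + 1) % 12) % 12 + 1 = (12 - s.length % 12) % 12 := by omega
      rw [← hc, List.replicate_succ' (n := (12 - (s.length + 1) % 12) % 12)]
      simp

-- the number of 12-bit blocks both programs use
def pvNB (n : Nat) : Nat := max 1 ((PySem.Int.bitLength (n : Int) + 11) / 12)

theorem pvPad_pvBin (n : Nat) : pvPadLoop 12 (pvBin n) = pvFixed n (12 * pvNB n) := by
  cases Nat.eq_zero_or_pos n with
  | inl h0 =>
    subst h0
    have h1 : pvNB 0 = 1 := by decide
    rw [h1, pvFixed_zero, pvPadLoop_eq 12 _ (by decide)]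
    decide
  | inr hpos =>
    have hb : (0:Nat) < (pvBinDigits n).length := by
      rw [pvBinDigits_pos n hpos]; simp
    have hbl : (pvBinDigits n).length = PySem.Int.bitLength (n : Int) := pvBinDigits_length n
    have hnb : 12 * pvNB n = 12 * ((PySem.Int.bitLength (n:Int) + 11) / 12) := by
      unfold pvNB; omega
    have hle : (pvBinDigits n).length ≤ 12 * pvNB n := by omega
    rw [show pvBin n = pvBinDigits n from by simp [pvBin, Nat.pos_iff_ne_zero.mp hpos],
        pvPadLoop_eq 12 _ (by omega), pvFixed_eq_pad n _ hle]
    congr 2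
    omega

-- range peeling and shifting
theorem pvRange12_shift (a L : Nat) : pvRange12 (a+12) (L+12) = (pvRange12 a L).map (· + 12) := by
  fun_induction pvRange12 a L with
  | case1 a h ih => rw [pvRange12]; simp [ih, Nat.add_lt_add_right h]
  | case2 a h => rw [pvRange12]; simp; omega

theorem pvModTail (m t k : Nat) (h : k < t) :
    (m % 2^(12*t)) / 2^(12*k) % 4096 = m / 2^(12*k) % 4096 := by
  have h1 : ∀ x : Nat, x / 2^(12*k) % 4096 = x % (2^(12*k) * 4096) / 2^(12*k) := fun x => by
    rw [Nat.mod_mul_right_div_self]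
  have h2 : (2:Nat)^(12*k) * 4096 = 2^(12*k+12) := by rw [pow_add]; norm_num
  rw [h1, h1, Nat.mod_mod_of_dvd]
  rw [h2]; exact pow_dvd_pow 2 (by omega)

-- A's per-element block values, in canonical form
set_option maxHeartbeats 2000000 in
theorem blockVals (t : Nat) : ∀ m : Nat,
    ((pvRange12 0 (12*t)).map (fun j => ((pvFixed m (12*t)).drop j).take 12)).map pvParseBin2
      = (List.range t).reverse.map (fun k => m / 2^(12*k) % 4096) := by
  induction t with
  | zero => intro m; simp [pvRange12]
  | succ t ih =>
    intro m
    have hsplit : pvFixed m (12*(t+1)) = pvFixed (m / 2^(12*t)) 12 ++ pvFixed (m % 2^(12*t)) (12*t) := by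
      rw [show 12*(t+1) = 12 + 12*t from by ring, pvFixed_split]
    have hcons : pvRange12 0 (12*(t+1)) = 0 :: pvRange12 12 (12*(t+1)) := by
      rw [pvRange12]; simp
    have hshift : pvRange12 12 (12*(t+1)) = (pvRange12 0 (12*t)).map (· + 12) := by
      have h := pvRange12_shift 0 (12*t)
      rw [show 12*(t+1) = 12*t + 12 from by ring]
      simpa using h
    have hlen12 : (pvFixed (m / 2^(12*t)) 12).length = 12 := pvFixed_length _ _
    simp only [hcons, hshift, List.map_cons, List.map_map]
    have hhead : ((pvFixed m (12*(t+1))).drop 0).take 12 = pvFixed (m / 2^(12*t)) 12 := by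
      rw [hsplit, List.drop_zero, List.take_append_of_le_length (by omega),
          List.take_of_length_le (by omega)]
    have htail : ∀ j, (pvFixed m (12*(t+1))).drop (j + 12) = (pvFixed (m % 2^(12*t)) (12*t)).drop j := by
      intro j
      rw [hsplit, show j + 12 = (pvFixed (m / 2^(12*t)) 12).length + j from by omega,
          List.drop_append]
      simp
    have hrr : (List.range (t+1)).reverse = t :: (List.range t).reverse := by
      simp [List.range_succ]
    simp only [hrr, List.map_cons]
    refine List.cons_eq_cons.mpr ⟨?_, ?_⟩
    · rw [hhead, pvParse_pvFixed]
      norm_num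
    · trans (List.map pvParseBin2 (List.map (fun j => ((pvFixed (m % 2^(12*t)) (12*t)).drop j).take 12) (pvRange12 0 (12*t))))
      · rw [List.map_map]
        apply List.map_congr_left
        intro j _
        simp only [Function.comp_apply, htail j]
      · rw [ih (m % 2^(12*t))]
        apply List.map_congr_left
        intro k hk
        have hkt : k < t := by
          rw [List.mem_reverse, List.mem_range] at hk
          exact hk
        exact pvModTail m t k hkt

-- Python (i >> (12*k)) & 0xFFF for a nonnegative i, as arithmetic
theorem pvBandShift (n k : Nat) :
    (PySem.Int.band ((n:Int) >>> (12*k)) 4095).toNat = n / 2^(12*k) % 4096 := by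
  have h0 : ((n:Int) >>> (12*k)) = ((n >>> (12*k) : Nat) : Int) := by
    simp [Int.shiftRight_eq, Nat.shiftRight_eq_div_pow, Int.shiftRight]
  have h1 : (4095:Int) = ((4095:Nat):Int) := by norm_num
  rw [h0, h1, PySem.Int.band_natCast, Int.toNat_natCast]
  have h2 : (4095 : Nat) = 2^12 - 1 := by norm_num
  rw [h2, Nat.and_two_pow_sub_one_eq_mod, Nat.shiftRight_eq_div_pow]

-- both programs emit, for one nonnegative element, exactly the same chunk of characters
theorem pvElem_eq (n : Nat) (acc : List Char) :
    (let binarka := pvPadLoop 12 (pvBin ((n:Int)).toNat)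
     let blocks := (pvRange12 0 binarka.length).map (fun j => (binarka.drop j).take 12)
     let decimal := blocks.foldl (fun d b => d ++ [pvParseBin2 b]) ([] : List Nat)
     decimal.foldl (fun t v => t ++ [Char.ofNat v]) acc)
    = (let nblocks := max 1 ((PySem.Int.bitLength (n:Int) + 11) / 12)
       (List.range nblocks).reverse.foldl (fun cs (k : Nat) =>
         cs ++ [Char.ofNat (PySem.Int.band ((n:Int) >>> (12 * k)) 4095).toNat]) acc) := by
  simp only [Int.toNat_natCast, PySem.List.foldl_append_singleton_eq_map]
  rw [pvPad_pvBin, pvFixed_length, List.nil_append]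
  simp only [pvNB] at *
  have hA := blockVals (max 1 ((PySem.Int.bitLength (n:Int) + 11) / 12)) n
  rw [hA, List.map_map]
  congr 1
  apply List.map_congr_left
  intro k _
  simp only [Function.comp_apply]
  rw [pvBandShift]

-- the two outer folds agree on any list of nonnegative integers
theorem pvFold_eq (l : List Int) (h : ∀ x ∈ l, 0 ≤ x) : ∀ acc : List Char,
    l.foldl (fun text i =>
      let binarka := pvPadLoop 12 (pvBin i.toNat)
      let blocks := (pvRange12 0 binarka.length).map (fun j => (binarka.drop j).take 12)
      let decimal := blocks.foldl (fun d b => d ++ [pvParseBin2 b]) ([] : List Nat)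
      decimal.foldl (fun t v => t ++ [Char.ofNat v]) text) acc
    = l.foldl (fun chars i =>
      let nblocks := max 1 ((PySem.Int.bitLength i + 11) / 12)
      (List.range nblocks).reverse.foldl (fun cs (k : Nat) =>
        cs ++ [Char.ofNat (PySem.Int.band (i >>> (12 * k)) 4095).toNat]) chars) acc := by
  induction l with
  | nil => intro acc; rfl
  | cons i l ih =>
    intro acc
    have hi : (0:Int) ≤ i := h i (List.mem_cons_self)
    have hrest : ∀ x ∈ l, (0:Int) ≤ x := fun x hx => h x (List.mem_cons_of_mem _ hx)
    rw [List.foldl_cons, List.foldl_cons, ih hrest]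
    congr 1
    have hcast : i = ((i.toNat : Nat) : Int) := (Int.toNat_of_nonneg hi).symm
    rw [hcast]
    exact pvElem_eq i.toNat acc

-- ===== VERDICT (by name: the statement is the Claim_ definition above) =====
theorem prevodCisla_spec : Claim_equal_prevodCisla := by
  unfold Claim_equal_prevodCisla
  intro cislo _ hpre
  unfold Spec_prevodCisla prevodCisla prevodCisla_alt
  exact congrArg _ (pvFold_eq cislo hpre [])
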